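-- pv_equiv track=rewrite | github.com/fundacion-sadosky/RECP | RESO-main/utilitarios.py | ocultar_nombre_funcion
-- ===== SOURCE A (Python) =====
-- def ocultar_nombre_funcion(code):
--     """
--     Reemplaza los nombres de las funciones que aparecen en code por el nombre "x"
--     Args:
--         code    :   Texto del codigo
--     """
--     try:
--         code = code.split()
--         for i in range(len(code)):
--             if code[i] == "function":
--                 code[i+1] = "x"
--         return " ".join(code)
--
--     except IndexError:
--         code.append("x")
--         return " ".join(code)
-- ===== SOURCE B (Python) =====
-- def ocultar_nombre_funcion(code):
--     """
--     Reemplaza los nombres de las funciones que aparecen en code por el nombre "x"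
--     Args:
--         code    :   Texto del codigo
--     """
--     result = []
--     replace_next = False
--     for token in code.split():
--         if replace_next:
--             result.append("x")
--             replace_next = False
--         else:
--             result.append(token)
--             replace_next = token == "function"
--     if replace_next:
--         result.append("x")
--     return " ".join(result)
-- ===== Notes on version B (the rewrite author's own statement) =====
-- stated objective: simpler
-- what changed: Replaced the index loop with in-place list mutation and the try/except IndexError fallback by a single forward pass carrying a replace_next flag (trailing flag appends the final 'x'), eliminating indexing and exception handling.
import Mathlib
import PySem

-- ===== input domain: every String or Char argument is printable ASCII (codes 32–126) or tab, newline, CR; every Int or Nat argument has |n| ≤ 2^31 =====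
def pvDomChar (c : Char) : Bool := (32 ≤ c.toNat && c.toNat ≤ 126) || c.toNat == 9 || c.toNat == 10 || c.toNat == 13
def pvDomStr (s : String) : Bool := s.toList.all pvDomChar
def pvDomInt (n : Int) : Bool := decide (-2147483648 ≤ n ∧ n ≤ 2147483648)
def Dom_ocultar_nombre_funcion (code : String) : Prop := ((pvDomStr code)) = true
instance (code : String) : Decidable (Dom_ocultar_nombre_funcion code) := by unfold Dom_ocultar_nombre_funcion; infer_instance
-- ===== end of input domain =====

-- B replaces A's index loop (with in-place list mutation and a try/except IndexError
-- for a trailing "function") by a single flag-carrying pass; objective: simpler.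

-- ===== PORT A =====
-- A's for-loop over range(len(code)) with in-place mutation code[i+1] = "x";
-- the except IndexError branch (i+1 out of range) appends "x" and joins.
def ocultarLoopA (l : List String) (i : Nat) : List String :=
  if h : i < l.length then
    if l[i] = "function" then
      if h2 : i + 1 < l.length then
        ocultarLoopA (l.set (i + 1) "x") (i + 1)
      else
        l ++ ["x"]          -- IndexError: code.append("x"), return
    else
      ocultarLoopA l (i + 1)
  else
    l
termination_by l.length - i
decreasing_by
  · simp only [List.length_set]; omega
  · omega

def ocultar_nombre_funcion (code : String) : String :=
  PySem.Str.join " " (ocultarLoopA (PySem.Str.split₀ code) 0)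

-- ===== PORT B =====
-- single pass with a replace_next flag, trailing flag appends "x"
def ocultarLoopB : List String → Bool → List String
  | [], flag => if flag then ["x"] else []
  | t :: ts, flag =>
    if flag then "x" :: ocultarLoopB ts false
    else t :: ocultarLoopB ts (t == "function")

def ocultar_nombre_funcion_alt (code : String) : String :=
  PySem.Str.join " " (ocultarLoopB (PySem.Str.split₀ code) false)

-- ===== PRECONDITION & SPEC =====
def Spec_ocultar_nombre_funcion (code : String) (out : String) : Prop := out = ocultar_nombre_funcion_alt code
instance (code : String) (out : String) : Decidable (Spec_ocultar_nombre_funcion code out) := by unfold Spec_ocultar_nombre_funcion; infer_instance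

-- ===== CLAIM (what is proved, stated in full; the proofs are below) =====
def Claim_equal_ocultar_nombre_funcion : Prop := ∀ (code : String), Dom_ocultar_nombre_funcion code → Spec_ocultar_nombre_funcion code (ocultar_nombre_funcion code)

-- ===== LEMMAS AND PROOFS =====

theorem set_append_cons (p : List String) (x u : String) (rest : List String) :
    (p ++ u :: rest).set p.length x = p ++ x :: rest := by
  induction p with
  | nil => simp
  | cons a q ih => simp [ih]

-- invariant: A's loop from index p.length on p ++ l (prefix p already processed,
-- no pending replacement at position p.length) equals p ++ B's loop on l with flag false
theorem loopA_eq_loopB (n : Nat) :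
    ∀ (l p : List String), l.length ≤ n →
      ocultarLoopA (p ++ l) p.length = p ++ ocultarLoopB l false := by
  induction n with
  | zero =>
    intro l p hl
    have : l = [] := List.eq_nil_of_length_eq_zero (Nat.le_zero.mp hl)
    subst this
    rw [ocultarLoopA]
    simp [ocultarLoopB]
  | succ n ih =>
    intro l p hl
    cases l with
    | nil =>
      rw [ocultarLoopA]; simp [ocultarLoopB]
    | cons t ts =>
      rw [ocultarLoopA]
      have hlen : p.length < (p ++ t :: ts).length := by simp
      have hget : (p ++ t :: ts)[p.length]'hlen = t := by
        simp [List.getElem_append_right]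
      rw [dif_pos hlen, hget]
      by_cases hf : t = "function"
      · rw [if_pos hf]
        cases ts with
        | nil =>
          have : ¬ p.length + 1 < (p ++ [t]).length := by simp
          rw [dif_neg this]
          simp [ocultarLoopB, hf]
        | cons u rest =>
          have h2 : p.length + 1 < (p ++ t :: u :: rest).length := by simp
          rw [dif_pos h2]
          have hset : (p ++ t :: u :: rest).set (p.length + 1) "x"
              = (p ++ [t]) ++ "x" :: rest := by
            have := set_append_cons (p ++ [t]) "x" u rest
            simpa using this
          have hidx : p.length + 1 = (p ++ [t]).length := by simp
          rw [hset, hidx, ih ("x" :: rest) (p ++ [t]) (by simp at hl ⊢; omega)]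
          simp [ocultarLoopB, hf]
      · rw [if_neg hf]
        have hidx : p.length + 1 = (p ++ [t]).length := by simp
        have hre : p ++ t :: ts = (p ++ [t]) ++ ts := by simp
        rw [hre, hidx, ih ts (p ++ [t]) (by simpa using Nat.le_of_succ_le_succ hl)]
        have hb : (t == "function") = false := beq_eq_false_iff_ne.mpr hf
        simp [ocultarLoopB, hb]

-- ===== VERDICT (by name: the statement is the Claim_ definition above) =====
theorem ocultar_nombre_funcion_spec : Claim_equal_ocultar_nombre_funcion := by
  intro code _
  unfold Spec_ocultar_nombre_funcion ocultar_nombre_funcion ocultar_nombre_funcion_alt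
  have h := loopA_eq_loopB (PySem.Str.split₀ code).length (PySem.Str.split₀ code) [] le_rfl
  simp only [List.nil_append, List.length_nil] at h
  rw [h]
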